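-- pv_equiv track=rewrite | github.com/kornlid/legend_of_boki | legend_of_boki_ver7/(LOB)Legend Of Boki.py | user_location
-- ===== SOURCE A (Python) =====
-- def user_location(x, y):
--     """유저의 위치값 반환함"""
--     user_present_location = {
--         '불': [0, 760, -20, 360],  # 불의지역 x1, x2, y3, y4  값
--         '눈': [780, 1560, -20, 360],  # 눈의지역
--         '숲': [0, 760, 380, 740],  # 숲의지역
--         '물': [780, 1560, 380, 740]  # 물의지역
--     }
--     for key, value in user_present_location.items():
--         if value[0] <= x <= value[1] and value[2] <= y <= value[3]:
--             return key
-- ===== SOURCE B (Python) =====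
-- def user_location(x, y):
--     """유저의 위치값 반환함"""
--     if 0 <= x <= 760:
--         col = 0
--     elif 780 <= x <= 1560:
--         col = 1
--     else:
--         return None
--     if -20 <= y <= 360:
--         row = 0
--     elif 380 <= y <= 740:
--         row = 1
--     else:
--         return None
--     return [['불', '눈'], ['숲', '물']][row][col]
-- ===== Notes on version B (the rewrite author's own statement) =====
-- stated objective: simpler
-- what changed: Replaces the scan over four named bounding boxes with two independent interval checks producing a column and row index, then a single 2x2 table lookup.
import Mathlib
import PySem

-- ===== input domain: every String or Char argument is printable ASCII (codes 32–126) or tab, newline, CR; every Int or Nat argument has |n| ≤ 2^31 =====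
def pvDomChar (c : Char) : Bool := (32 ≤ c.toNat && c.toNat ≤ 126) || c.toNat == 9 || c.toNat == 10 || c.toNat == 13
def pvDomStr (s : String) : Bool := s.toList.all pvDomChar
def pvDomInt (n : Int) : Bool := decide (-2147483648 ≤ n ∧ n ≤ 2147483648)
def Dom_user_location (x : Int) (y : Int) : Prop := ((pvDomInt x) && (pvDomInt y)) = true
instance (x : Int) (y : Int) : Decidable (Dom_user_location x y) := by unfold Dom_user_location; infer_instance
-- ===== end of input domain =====

-- B replaces A's scan over four named bounding boxes with independent column/row
-- interval checks plus a 2x2 table lookup (objective: simpler).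

-- ===== PORT A =====
-- A iterates the dict's four (key, box) items in insertion order, returning the
-- first key whose box contains (x, y); falling off the loop returns None.
def user_location (x : Int) (y : Int) : Option String :=
  let user_present_location : PySem.Dict String (List Int) :=
    (PySem.Dict.empty
      |>.insert "불" [0, 760, -20, 360]
      |>.insert "눈" [780, 1560, -20, 360]
      |>.insert "숲" [0, 760, 380, 740]
      |>.insert "물" [780, 1560, 380, 740])
  (user_present_location.items.foldl (fun acc kv =>
    match acc with
    | some _ => acc
    | none =>
      let key := kv.1
      let value := kv.2
      -- value[i]: the indices 0..3 are always in range for these 4-element boxes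
      if (PySem.List.pyGetD value 0 0) ≤ x ∧ x ≤ (PySem.List.pyGetD value 1 0) ∧
         (PySem.List.pyGetD value 2 0) ≤ y ∧ y ≤ (PySem.List.pyGetD value 3 0) then some key else none)
    none)

-- ===== PORT B =====
def user_location_alt (x : Int) (y : Int) : Option String :=
  if 0 ≤ x ∧ x ≤ 760 then
    if -20 ≤ y ∧ y ≤ 360 then some ((PySem.List.pyGetD (PySem.List.pyGetD [["불", "눈"], ["숲", "물"]] 0 []) 0 ""))
    else if 380 ≤ y ∧ y ≤ 740 then some ((PySem.List.pyGetD (PySem.List.pyGetD [["불", "눈"], ["숲", "물"]] 1 []) 0 ""))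
    else none
  else if 780 ≤ x ∧ x ≤ 1560 then
    if -20 ≤ y ∧ y ≤ 360 then some ((PySem.List.pyGetD (PySem.List.pyGetD [["불", "눈"], ["숲", "물"]] 0 []) 1 ""))
    else if 380 ≤ y ∧ y ≤ 740 then some ((PySem.List.pyGetD (PySem.List.pyGetD [["불", "눈"], ["숲", "물"]] 1 []) 1 ""))
    else none
  else none

-- ===== PRECONDITION & SPEC =====
def Spec_user_location (x : Int) (y : Int) (out : Option String) : Prop := out = user_location_alt x y
instance (x : Int) (y : Int) (out : Option String) : Decidable (Spec_user_location x y out) := by unfold Spec_user_location; infer_instance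

-- ===== CLAIM (what is proved, stated in full; the proofs are below) =====
def Claim_equal_user_location : Prop := ∀ (x : Int) (y : Int), Dom_user_location x y → Spec_user_location x y (user_location x y)

-- ===== LEMMAS AND PROOFS =====

-- ===== VERDICT (by name: the statement is the Claim_ definition above) =====
set_option maxHeartbeats 1000000 in
theorem user_location_spec : Claim_equal_user_location := by
  intro x y _
  unfold Spec_user_location user_location user_location_alt
  simp only [PySem.Dict.insert, PySem.Dict.empty, PySem.List.pyGetD]
  by_cases hx1 : 0 ≤ x ∧ x ≤ 760 <;> by_cases hx2 : 780 ≤ x ∧ x ≤ 1560 <;>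
    by_cases hy1 : -20 ≤ y ∧ y ≤ 360 <;> by_cases hy2 : 380 ≤ y ∧ y ≤ 740 <;>
    simp_all <;> split_ifs <;> simp_all
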